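-- pv_equiv track=rewrite | github.com/hyungyugod/study-coding-test | 프로그래머스/1/138477. 명예의 전당 （1）/명예의 전당 （1）.py | solution
-- ===== SOURCE A (Python) =====
-- def solution(k, score):
--     answer = []
--     box = []
--     for i in score:
--         box.append(i)
--         box.sort()
--         if len(box) == k + 1:
--             box.pop(0)           # pop 안에는 인덱스를 넣어야 한다.
--             answer.append(box[0])
--
--         else:
--             answer.append(box[0])
--
--     return answer
-- ===== SOURCE B (Python) =====
-- def solution(k, score):
--     # Day i's answer is the cutoff of the hall of fame: the k-th largest score
--     # among the first i+1 days (or the minimum so far while fewer than k days).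
--     return [sorted(score[:i + 1])[-k:][0] for i in range(len(score))]
-- ===== Notes on version B (the rewrite author's own statement) =====
-- stated objective: simpler
-- what changed: B replaces A's stateful loop (a mutable box re-sorted and popped every day) by a stateless one-line comprehension that reads each day's answer directly off the sorted prefix as sorted(score[:i+1])[-k:][0].
-- outside the precondition, e.g. on solution(-1, [3, 1, 2]): A returns [3, 1, 1], B raises IndexError; on solution(0, [1]): A raises IndexError, B returns [1]
import Mathlib
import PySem

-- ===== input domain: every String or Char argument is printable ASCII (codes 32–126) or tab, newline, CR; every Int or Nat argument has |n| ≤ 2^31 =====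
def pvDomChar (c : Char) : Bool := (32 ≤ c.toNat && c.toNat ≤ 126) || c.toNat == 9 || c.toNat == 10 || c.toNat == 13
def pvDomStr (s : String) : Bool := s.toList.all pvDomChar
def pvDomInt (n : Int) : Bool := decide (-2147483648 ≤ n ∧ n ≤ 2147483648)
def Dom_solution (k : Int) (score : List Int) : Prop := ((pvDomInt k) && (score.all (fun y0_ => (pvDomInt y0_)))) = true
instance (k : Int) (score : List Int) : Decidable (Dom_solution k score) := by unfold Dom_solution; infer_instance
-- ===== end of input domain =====

-- B replaces A's stateful loop (mutable box re-sorted and popped each day) by a stateless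
-- comprehension reading each answer directly off the sorted prefix; objective: simpler.

-- ===== PORT A =====
-- the body of A's for-loop, acting on the state (answer, box)
def stepA (k : Int) (st : List Int × List Int) (i : Int) : List Int × List Int :=
  let box1 := PySem.List.sorted (st.2 ++ [i]) (fun x => x)       -- box.append(i); box.sort()
  if (box1.length : Int) = k + 1 then
    match PySem.List.pop? box1 0 with                             -- box.pop(0)
    | some (_, box2) => (st.1 ++ [(PySem.List.pyGet? box2 0).getD 0], box2)
        -- 'none' on pyGet? = Python's IndexError on box[0] (only when k = 0); excluded by Pre_
    | none => (st.1, box1)  -- unreachable: box1 was just appended to, pop(0) cannot raise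
  else
    (st.1 ++ [(PySem.List.pyGet? box1 0).getD 0], box1)

def solution (k : Int) (score : List Int) : List Int :=
  (score.foldl (stepA k) ([], [])).1

-- ===== PORT B =====
def solution_alt (k : Int) (score : List Int) : List Int :=
  (PySem.List.pyRange 0 (score.length : Int)).map (fun i =>
    (PySem.List.pyGet?
      (PySem.List.slice
        (PySem.List.sorted (PySem.List.slice score none (some (i + 1))) (fun x => x))
        (some (-k)) none)
      0).getD 0)

-- ===== PRECONDITION & SPEC =====
-- Pre_ restricts k to the task's natural domain k ≥ 1 (a positive hall-of-fame size):
-- for k = 0 A raises IndexError on any nonempty score (box[0] after the pop empties the box),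
-- and k < 0 is outside the task's domain (A then degenerates to a running minimum over an
-- unbounded box while B raises); on score = [] both return [] for every k.
def Pre_solution (k : Int) (score : List Int) : Prop := 1 ≤ k ∨ score = []
instance (k : Int) (score : List Int) : Decidable (Pre_solution k score) := by
  unfold Pre_solution; infer_instance

def pvWitness_solution : Int × List Int := (3, [10, 100, 20, 150, 1, 100, 200])

def Spec_solution (k : Int) (score : List Int) (out : List Int) : Prop := out = solution_alt k score
instance (k : Int) (score : List Int) (out : List Int) : Decidable (Spec_solution k score out) := by
  unfold Spec_solution; infer_instance

-- ===== CLAIM (what is proved, stated in full; the proofs are below) =====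
def Claim_equal_solution : Prop := ∀ (k : Int) (score : List Int), Dom_solution k score → Pre_solution k score → Spec_solution k score (solution k score)

-- ===== LEMMAS AND PROOFS =====

-- the value both programs emit for the prefix q: head of the k largest of q (sorted ascending)
def tmin (k : Int) (q : List Int) : Int :=
  ((PySem.List.sorted q (fun v => v)).drop (q.length - k.toNat)).headD 0

-- the list of answers A's loop emits for 'rest' after having already processed prefix p
def answersR (k : Int) (p rest : List Int) : List Int :=
  match rest with
  | [] => []
  | x :: rs => tmin k (p ++ [x]) :: answersR k (p ++ [x]) rs

lemma pyGet?_zero_getD (l : List Int) : (PySem.List.pyGet? l 0).getD 0 = l.headD 0 := by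
  cases l <;> simp [PySem.List.pyGet?, PySem.List.pyIdx?]

lemma oi_front (x : Int) (l : List Int) (h : ∀ y ∈ l, x ≤ y) :
    List.orderedInsert (· ≤ ·) x l = x :: l := by
  cases l with
  | nil => rfl
  | cons c t => simp [List.orderedInsert, h c (by simp)]

lemma oi_drop (x : Int) (S : List Int) : ∀ m : Nat, S.Pairwise (· ≤ ·) → m ≤ S.length →
    (List.orderedInsert (· ≤ ·) x (S.drop m)).drop 1
      = (List.orderedInsert (· ≤ ·) x S).drop (m + 1) := by
  induction S with
  | nil =>
    intro m _ hm
    have : m = 0 := by simp at hm; omega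
    subst this; rfl
  | cons b S' ih =>
    intro m hp hm
    have hb : ∀ y ∈ S', b ≤ y := (List.pairwise_cons.mp hp).1
    cases m with
    | zero => rfl
    | succ j =>
      simp only [List.drop_succ_cons]
      by_cases hxb : x ≤ b
      · rw [oi_front x (S'.drop j) (fun y hy => le_trans hxb (hb y (List.mem_of_mem_drop hy)))]
        simp [List.orderedInsert, hxb]
      · rw [ih j (List.pairwise_cons.mp hp).2 (by simpa using hm)]
        simp [List.orderedInsert, hxb]

lemma srt_append_of_pairwise (T : List Int) (hT : T.Pairwise (· ≤ ·)) (x : Int) :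
    PySem.List.sorted (T ++ [x]) (fun v => v) = List.orderedInsert (· ≤ ·) x T := by
  apply PySem.List.sorted_id_eq_of_perm_of_pairwise
  · exact (List.perm_orderedInsert _ x T).trans (List.perm_append_singleton x T).symm
  · exact List.Pairwise.orderedInsert x T hT

lemma srt_append (p : List Int) (x : Int) :
    PySem.List.sorted (p ++ [x]) (fun v => v)
      = List.orderedInsert (· ≤ ·) x (PySem.List.sorted p (fun v => v)) := by
  apply PySem.List.sorted_id_eq_of_perm_of_pairwise
  · exact (List.perm_orderedInsert _ x _).trans
      (((PySem.List.sorted_perm p _ false).cons x).trans (List.perm_append_singleton x p).symm)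
  · exact List.Pairwise.orderedInsert x _ (PySem.List.sorted_pairwise p _)

lemma foldl_stepA (k : Int) (hk : 1 ≤ k) :
    ∀ (rest p ans : List Int),
      (rest.foldl (stepA k)
        (ans, (PySem.List.sorted p (fun v => v)).drop (p.length - k.toNat))).1
        = ans ++ answersR k p rest := by
  intro rest
  induction rest with
  | nil => intro p ans; simp [answersR]
  | cons x rs ih =>
    intro p ans
    have hkK : ((k.toNat : Int)) = k := Int.toNat_of_nonneg (by omega)
    have hpair : (PySem.List.sorted p (fun v : Int => v)).Pairwise (· ≤ ·) :=
      PySem.List.sorted_pairwise p _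
    have hSlen : (PySem.List.sorted p (fun v : Int => v)).length = p.length :=
      PySem.List.length_sorted p _ false
    have hbox1 : PySem.List.sorted
        ((PySem.List.sorted p (fun v => v)).drop (p.length - k.toNat) ++ [x]) (fun v => v)
        = List.orderedInsert (· ≤ ·) x
            ((PySem.List.sorted p (fun v => v)).drop (p.length - k.toNat)) :=
      srt_append_of_pairwise _ hpair.drop x
    by_cases hK : k.toNat ≤ p.length
    · -- the box is full: the branch pops its minimum
      have hlen : (List.orderedInsert (· ≤ ·) x
          ((PySem.List.sorted p (fun v => v)).drop (p.length - k.toNat))).length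
          = k.toNat + 1 := by
        rw [List.orderedInsert_length]; simp; omega
      have hcond : ((List.orderedInsert (· ≤ ·) x
          ((PySem.List.sorted p (fun v => v)).drop (p.length - k.toNat))).length : Int)
          = k + 1 := by rw [hlen]; push_cast [hkK]; ring
      obtain ⟨c, t, hct⟩ : ∃ c t, List.orderedInsert (· ≤ ·) x
          ((PySem.List.sorted p (fun v => v)).drop (p.length - k.toNat)) = c :: t := by
        cases h : List.orderedInsert (· ≤ ·) x
            ((PySem.List.sorted p (fun v => v)).drop (p.length - k.toNat)) with
        | nil => rw [h] at hlen; simp at hlen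
        | cons c t => exact ⟨c, t, rfl⟩
      have hcond' : (((c :: t).length : Nat) : Int) = k + 1 := hct ▸ hcond
      have ht : t = (PySem.List.sorted (p ++ [x]) (fun v => v)).drop
          ((p ++ [x]).length - k.toNat) := by
        have h1 : t = (List.orderedInsert (· ≤ ·) x
            ((PySem.List.sorted p (fun v => v)).drop (p.length - k.toNat))).drop 1 := by
          rw [hct]; rfl
        rw [h1, oi_drop x _ _ hpair (by omega), srt_append]
        congr 1
        simp [hSlen]; omega
      have htm : (PySem.List.pyGet? t 0).getD 0 = tmin k (p ++ [x]) := by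
        simp only [pyGet?_zero_getD, ht, tmin]
      simp only [List.foldl_cons, stepA]
      rw [hbox1, hct, if_pos hcond']
      simp only [PySem.List.pop?_zero_cons]
      rw [htm, ht, ih (p ++ [x]) (ans ++ [tmin k (p ++ [x])])]
      simp [answersR]
    · -- fewer than k scores so far: the box only grows
      have hm0 : p.length - k.toNat = 0 := by omega
      have hlen : (List.orderedInsert (· ≤ ·) x
          ((PySem.List.sorted p (fun v => v)).drop (p.length - k.toNat))).length
          = p.length + 1 := by
        rw [List.orderedInsert_length]; simp [hSlen, hm0]
      have hcond : ¬ (((List.orderedInsert (· ≤ ·) x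
          ((PySem.List.sorted p (fun v => v)).drop (p.length - k.toNat))).length : Int)
          = k + 1) := by
        rw [hlen]; push_cast; omega
      have hbox2 : List.orderedInsert (· ≤ ·) x
          ((PySem.List.sorted p (fun v => v)).drop (p.length - k.toNat))
          = (PySem.List.sorted (p ++ [x]) (fun v => v)).drop ((p ++ [x]).length - k.toNat) := by
        have h2 : (p ++ [x]).length - k.toNat = 0 := by simp; omega
        rw [h2, hm0, List.drop_zero, List.drop_zero, srt_append]
      have htm : (PySem.List.pyGet? (List.orderedInsert (· ≤ ·) x
          ((PySem.List.sorted p (fun v => v)).drop (p.length - k.toNat))) 0).getD 0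
          = tmin k (p ++ [x]) := by
        simp only [pyGet?_zero_getD, hbox2, tmin]
      simp only [List.foldl_cons, stepA]
      rw [hbox1, if_neg hcond, htm, hbox2, ih (p ++ [x]) (ans ++ [tmin k (p ++ [x])])]
      simp [answersR]

lemma answersR_eq_map (k : Int) : ∀ (rest p : List Int),
    answersR k p rest
      = (List.range rest.length).map (fun j => tmin k (p ++ rest.take (j + 1))) := by
  intro rest
  induction rest with
  | nil => intro p; simp [answersR]
  | cons x rs ih =>
    intro p
    rw [List.length_cons, List.range_succ_eq_map, List.map_cons, List.map_map]
    simp only [answersR, List.cons.injEq]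
    refine ⟨by simp, ?_⟩
    rw [ih (p ++ [x])]
    apply List.map_congr_left
    intro j hj
    simp [Function.comp, List.append_assoc]

lemma sorted_nil_int : PySem.List.sorted ([] : List Int) (fun v => v) = [] :=
  (PySem.List.sorted_eq_nil_iff [] _ false).mpr rfl

lemma solution_alt_eq (k : Int) (hk : 1 ≤ k) (score : List Int) :
    solution_alt k score
      = (List.range score.length).map (fun j => tmin k (score.take (j + 1))) := by
  unfold solution_alt
  rw [PySem.List.pyRange_one]
  have hn : ((score.length : Int) - 0).toNat = score.length := by omega
  rw [hn, List.map_map]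
  apply List.map_congr_left
  intro j hj
  have h1 : (0 : Int) + (j : Nat) + 1 = ((j + 1 : Nat) : Int) := by push_cast; ring
  have hkn : -k = -(((k.toNat : Nat)) : Int) := by rw [Int.toNat_of_nonneg (by omega)]
  simp only [Function.comp_apply]
  rw [h1, PySem.List.slice_to_natCast, hkn,
    PySem.List.slice_from_neg_natCast _ _ (by omega), pyGet?_zero_getD,
    PySem.List.length_sorted]
  rfl

-- ===== VERDICT (by name: the statement is the Claim_ definition above) =====
theorem solution_spec : Claim_equal_solution := by
  intro k score _ hpre
  unfold Spec_solution
  rcases hpre with hk | hnil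
  · have hstart := foldl_stepA k hk score [] []
    rw [sorted_nil_int] at hstart
    simp only [List.length_nil, List.drop_nil, List.nil_append] at hstart
    unfold solution
    rw [hstart, answersR_eq_map, solution_alt_eq k hk]
    simp
  · subst hnil
    rfl
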